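-- pv_equiv track=rewrite | github.com/tylrdvs277/PPMEditing | blur.py | build_pixs_to_avg
-- ===== SOURCE A (Python) =====
-- def build_pixs_to_avg(pixels, pix_1d, reach, length, height):
--     pix_row = pix_1d // length
--     pix_col = pix_1d % length
--     return [pixels[row_idx * length + col_idx]
--             for row_idx in range(max(pix_row - reach, 0),
--                 min(pix_row + reach, height - 1) + 1)
--             for col_idx in range(max(pix_col - reach, 0),
--                 min(pix_col + reach, length - 1) + 1)]
-- ===== SOURCE B (Python) =====
-- def build_pixs_to_avg(pixels, pix_1d, reach, length, height):
--     pix_row, pix_col = divmod(pix_1d, length)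
--     lo_r, hi_r = max(pix_row - reach, 0), min(pix_row + reach, height - 1)
--     lo_c, hi_c = max(pix_col - reach, 0), min(pix_col + reach, length - 1)
--     return [p for i, p in enumerate(pixels)
--             if lo_r <= i // length <= hi_r and lo_c <= i % length <= hi_c]
-- ===== Notes on version B (the rewrite author's own statement) =====
-- stated objective: alternative
-- what changed: Instead of generating window coordinates and indexing into the flat pixel list, B makes a single filtering pass over enumerate(pixels), keeping exactly the pixels whose index decomposes (divmod by length) into a row and column inside the clamped window.
import Mathlib
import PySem

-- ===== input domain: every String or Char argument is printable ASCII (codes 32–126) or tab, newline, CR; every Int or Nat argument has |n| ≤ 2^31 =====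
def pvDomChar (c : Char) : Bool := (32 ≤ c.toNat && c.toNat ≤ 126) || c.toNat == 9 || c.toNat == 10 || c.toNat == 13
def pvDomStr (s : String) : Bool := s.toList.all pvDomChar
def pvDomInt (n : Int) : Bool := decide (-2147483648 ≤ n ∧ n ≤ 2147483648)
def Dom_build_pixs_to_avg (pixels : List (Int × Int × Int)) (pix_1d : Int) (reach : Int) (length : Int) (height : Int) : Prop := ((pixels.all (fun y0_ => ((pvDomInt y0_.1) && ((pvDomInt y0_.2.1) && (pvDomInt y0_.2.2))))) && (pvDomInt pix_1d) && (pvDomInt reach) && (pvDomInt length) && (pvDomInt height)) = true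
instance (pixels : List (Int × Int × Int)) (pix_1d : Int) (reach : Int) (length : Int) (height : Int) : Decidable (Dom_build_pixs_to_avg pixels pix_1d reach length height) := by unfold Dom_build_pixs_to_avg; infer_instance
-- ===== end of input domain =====

-- B replaces A's coordinate-generating double comprehension with index lookups by a single
-- filtering pass over enumerate(pixels) that keeps pixels whose flat index decomposes into
-- a row/column inside the clamped window (objective: alternative algorithm).

-- ===== PORT A =====
def build_pixs_to_avg (pixels : List (Int × Int × Int)) (pix_1d : Int) (reach : Int) (length : Int) (height : Int) : List (Int × Int × Int) :=
  let pix_row := PySem.Int.floordiv pix_1d length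
  let pix_col := PySem.Int.mod pix_1d length
  (PySem.List.pyRange (max (pix_row - reach) 0) (min (pix_row + reach) (height - 1) + 1) 1).flatMap
    (fun row_idx =>
      (PySem.List.pyRange (max (pix_col - reach) 0) (min (pix_col + reach) (length - 1) + 1) 1).map
        (fun col_idx => PySem.List.pyGetD pixels (row_idx * length + col_idx) (0, 0, 0)))

-- ===== PORT B =====
def build_pixs_to_avg_alt (pixels : List (Int × Int × Int)) (pix_1d : Int) (reach : Int) (length : Int) (height : Int) : List (Int × Int × Int) :=
  let pix_row := PySem.Int.floordiv pix_1d length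
  let pix_col := PySem.Int.mod pix_1d length
  let lo_r := max (pix_row - reach) 0
  let hi_r := min (pix_row + reach) (height - 1)
  let lo_c := max (pix_col - reach) 0
  let hi_c := min (pix_col + reach) (length - 1)
  ((PySem.List.enumerate pixels).filter (fun ip =>
      decide (lo_r ≤ PySem.Int.floordiv ip.1 length) && decide (PySem.Int.floordiv ip.1 length ≤ hi_r) &&
      decide (lo_c ≤ PySem.Int.mod ip.1 length) && decide (PySem.Int.mod ip.1 length ≤ hi_c))).map (·.2)

-- ===== PRECONDITION & SPEC =====
-- Pre_ excludes exactly the inputs where the Python A raises: length = 0 (ZeroDivisionError)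
-- and, for a nonempty clamped window, a window reaching past the end of pixels (IndexError).
def Pre_build_pixs_to_avg (pixels : List (Int × Int × Int)) (pix_1d : Int) (reach : Int) (length : Int) (height : Int) : Prop :=
  length ≠ 0 ∧
  (max (PySem.Int.floordiv pix_1d length - reach) 0 ≤ min (PySem.Int.floordiv pix_1d length + reach) (height - 1) →
   max (PySem.Int.mod pix_1d length - reach) 0 ≤ min (PySem.Int.mod pix_1d length + reach) (length - 1) →
   min (PySem.Int.floordiv pix_1d length + reach) (height - 1) * length +
     min (PySem.Int.mod pix_1d length + reach) (length - 1) < (pixels.length : Int))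
instance (pixels : List (Int × Int × Int)) (pix_1d : Int) (reach : Int) (length : Int) (height : Int) : Decidable (Pre_build_pixs_to_avg pixels pix_1d reach length height) := by unfold Pre_build_pixs_to_avg; infer_instance

def pvWitness_build_pixs_to_avg : (List (Int × Int × Int)) × Int × Int × Int × Int :=
  ([(0, 0, 0), (1, 1, 1), (2, 2, 2), (3, 3, 3)], 0, 1, 2, 2)

def Spec_build_pixs_to_avg (pixels : List (Int × Int × Int)) (pix_1d : Int) (reach : Int) (length : Int) (height : Int) (out : List (Int × Int × Int)) : Prop := out = build_pixs_to_avg_alt pixels pix_1d reach length height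
instance (pixels : List (Int × Int × Int)) (pix_1d : Int) (reach : Int) (length : Int) (height : Int) (out : List (Int × Int × Int)) : Decidable (Spec_build_pixs_to_avg pixels pix_1d reach length height out) := by unfold Spec_build_pixs_to_avg; infer_instance

-- ===== CLAIM (what is proved, stated in full; the proofs are below) =====
def Claim_equal_build_pixs_to_avg : Prop := ∀ (pixels : List (Int × Int × Int)) (pix_1d : Int) (reach : Int) (length : Int) (height : Int), Dom_build_pixs_to_avg pixels pix_1d reach length height → Pre_build_pixs_to_avg pixels pix_1d reach length height → Spec_build_pixs_to_avg pixels pix_1d reach length height (build_pixs_to_avg pixels pix_1d reach length height)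

-- ===== LEMMAS AND PROOFS =====

-- shifting a range inside a map (specialised to the indexing function)
theorem pv_row_shift (pixels : List (Int × Int × Int)) (b u v : Int) :
    (PySem.List.pyRange u (v + 1) 1).map (fun c => PySem.List.pyGetD pixels (b + c) ((0 : Int), (0 : Int), (0 : Int))) =
      (PySem.List.pyRange (b + u) (b + v + 1) 1).map (fun j => PySem.List.pyGetD pixels j ((0 : Int), (0 : Int), (0 : Int))) := by
  rw [PySem.List.pyRange_one u (v + 1), PySem.List.pyRange_one (b + u) (b + v + 1)]
  simp only [List.map_map]
  have harg : b + v + 1 - (b + u) = v + 1 - u := by ring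
  rw [harg]
  apply List.map_congr_left
  intro k _
  simp only [Function.comp]
  congr 1
  ring

-- the filtered index list equals the concatenation of the per-row index blocks
theorem pv_filter_blocks (len cs ce rs re N : Int)
    (hlen : 0 < len) (hcs : 0 ≤ cs) (hce : ce ≤ len - 1) (hrs : 0 ≤ rs)
    (hN : rs ≤ re → cs ≤ ce → re * len + ce < N) :
    (PySem.List.pyRange 0 N 1).filter
        (fun j => decide (rs ≤ PySem.Int.floordiv j len) && decide (PySem.Int.floordiv j len ≤ re) &&
                  decide (cs ≤ PySem.Int.mod j len) && decide (PySem.Int.mod j len ≤ ce)) =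
      (PySem.List.pyRange rs (re + 1) 1).flatMap
        (fun r => PySem.List.pyRange (r * len + cs) (r * len + ce + 1) 1) := by
  have hpairL : (List.filter
      (fun j => decide (rs ≤ PySem.Int.floordiv j len) && decide (PySem.Int.floordiv j len ≤ re) &&
                decide (cs ≤ PySem.Int.mod j len) && decide (PySem.Int.mod j len ≤ ce))
      (PySem.List.pyRange 0 N 1)).Pairwise (· < ·) :=
    List.Pairwise.filter _ (PySem.List.pairwise_lt_pyRange_one 0 N)
  have hpairR : ((PySem.List.pyRange rs (re + 1) 1).flatMap
      (fun r => PySem.List.pyRange (r * len + cs) (r * len + ce + 1) 1)).Pairwise (· < ·) := by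
    rw [List.pairwise_flatMap]
    refine ⟨fun a _ => PySem.List.pairwise_lt_pyRange_one _ _, ?_⟩
    refine (PySem.List.pairwise_lt_pyRange_one rs (re + 1)).imp ?_
    intro r1 r2 h12 x hx y hy
    rw [PySem.List.mem_pyRange_one] at hx hy
    nlinarith [mul_le_mul_of_nonneg_right (show r1 + 1 ≤ r2 by omega) (le_of_lt hlen)]
  have hmem : ∀ j : Int, (j ∈ List.filter
      (fun j => decide (rs ≤ PySem.Int.floordiv j len) && decide (PySem.Int.floordiv j len ≤ re) &&
                decide (cs ≤ PySem.Int.mod j len) && decide (PySem.Int.mod j len ≤ ce))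
      (PySem.List.pyRange 0 N 1)) ↔ j ∈ (PySem.List.pyRange rs (re + 1) 1).flatMap
      (fun r => PySem.List.pyRange (r * len + cs) (r * len + ce + 1) 1) := by
    intro j
    simp only [List.mem_filter, PySem.List.mem_pyRange_one, List.mem_flatMap,
               Bool.and_eq_true, decide_eq_true_eq]
    constructor
    · rintro ⟨⟨hj0, hjN⟩, ⟨⟨hq1, hq2⟩, hm1⟩, hm2⟩
      have hid := PySem.Int.floordiv_mul_add_mod j len
      exact ⟨PySem.Int.floordiv j len, ⟨hq1, by omega⟩, by linarith, by linarith⟩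
    · rintro ⟨r, ⟨hr1, hr2⟩, hx1, hx2⟩
      have hrlen0 : 0 ≤ r * len := mul_nonneg (by omega) (by omega)
      have hfd : PySem.Int.floordiv j len = r := by
        rw [PySem.Int.floordiv_eq_iff_of_pos hlen]
        constructor
        · linarith
        · nlinarith
      have hid := PySem.Int.floordiv_mul_add_mod j len
      rw [hfd] at hid
      have hjN : j < N := by
        have h1 : r * len ≤ re * len := mul_le_mul_of_nonneg_right (by omega) (by omega)
        have h2 := hN (by omega) (by linarith)
        linarith
      exact ⟨⟨by linarith, hjN⟩, ⟨⟨by rw [hfd]; omega, by rw [hfd]; omega⟩, by linarith⟩, by linarith⟩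
  have hnodL := hpairL.imp (fun {a b} (h : a < b) => ne_of_lt h)
  have hnodR := hpairR.imp (fun {a b} (h : a < b) => ne_of_lt h)
  have hperm := (List.perm_ext_iff_of_nodup hnodL hnodR).2 hmem
  have e1 := PySem.List.sorted_eq_of_perm_of_pairwise_lt _ _ (fun x : Int => x) hperm hpairL
  have e2 := PySem.List.sorted_eq_of_perm_of_pairwise_lt _ _ (fun x : Int => x) (List.Perm.refl
      ((PySem.List.pyRange rs (re + 1) 1).flatMap
        (fun r => PySem.List.pyRange (r * len + cs) (r * len + ce + 1) 1))) hpairR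
  rw [← e1]; exact e2

-- ===== VERDICT (by name: the statement is the Claim_ definition above) =====
theorem build_pixs_to_avg_spec : Claim_equal_build_pixs_to_avg := by
  intro pixels pix_1d reach length height _ hpre
  obtain ⟨hl0, hbound⟩ := hpre
  unfold Spec_build_pixs_to_avg build_pixs_to_avg build_pixs_to_avg_alt
  simp only []
  set pr := PySem.Int.floordiv pix_1d length with hpr
  set pc := PySem.Int.mod pix_1d length with hpc
  set rs := max (pr - reach) 0 with hrs
  set re := min (pr + reach) (height - 1) with hre
  set cs := max (pc - reach) 0 with hcs
  set ce := min (pc + reach) (length - 1) with hce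
  rw [PySem.List.enumerate_eq_map_pyRange pixels ((0 : Int), (0 : Int), (0 : Int)), List.filter_map,
      List.map_map]
  rcases lt_or_gt_of_ne hl0 with hneg | hpos
  · -- length < 0: the column window is empty, both sides are []
    have hce0 : ce + 1 ≤ cs := by omega
    rw [PySem.List.pyRange_one_eq_nil hce0]
    simp only [List.map_nil]
    have h1 : List.flatMap (fun (_ : Int) => ([] : List (Int × Int × Int)))
        (PySem.List.pyRange rs (re + 1) 1) = [] := by simp
    rw [h1]
    symm
    rw [List.map_eq_nil_iff, List.filter_eq_nil_iff]
    intro p hp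
    simp only [Function.comp_def, Bool.and_eq_true, decide_eq_true_eq, not_and]
    rintro ⟨⟨_, _⟩, h3⟩ h4
    omega
  · -- length > 0: reduce both sides to maps over the same index list
    have hrow : ∀ r : Int,
        (PySem.List.pyRange cs (ce + 1) 1).map
          (fun col_idx => PySem.List.pyGetD pixels (r * length + col_idx) ((0 : Int), (0 : Int), (0 : Int))) =
        (PySem.List.pyRange (r * length + cs) (r * length + ce + 1) 1).map
          (fun j => PySem.List.pyGetD pixels j ((0 : Int), (0 : Int), (0 : Int))) :=
      fun r => pv_row_shift pixels (r * length) cs ce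
    calc (PySem.List.pyRange rs (re + 1) 1).flatMap
          (fun row_idx => (PySem.List.pyRange cs (ce + 1) 1).map
            (fun col_idx => PySem.List.pyGetD pixels (row_idx * length + col_idx) ((0 : Int), (0 : Int), (0 : Int))))
        = (PySem.List.pyRange rs (re + 1) 1).flatMap
            (fun r => (PySem.List.pyRange (r * length + cs) (r * length + ce + 1) 1).map
              (fun j => PySem.List.pyGetD pixels j ((0 : Int), (0 : Int), (0 : Int)))) := by
          exact List.flatMap_congr (fun r _ => hrow r)
      _ = ((PySem.List.pyRange rs (re + 1) 1).flatMap
            (fun r => PySem.List.pyRange (r * length + cs) (r * length + ce + 1) 1)).map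
              (fun j => PySem.List.pyGetD pixels j ((0 : Int), (0 : Int), (0 : Int))) := by
          rw [List.map_flatMap]
      _ = _ := by
          rw [← pv_filter_blocks length cs ce rs re (PySem.List.len pixels) hpos (by omega) (by omega)
                (by omega) (by rw [PySem.List.len_eq]; exact hbound)]
          simp [Function.comp_def]
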